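-- pv_equiv track=rewrite | github.com/johanneshagspiel/leetcode-exercises | python/premium_exercises/2107 Number of Unique Flavors After Sharing K Candies/attempt_1.py | shareCandies
-- ===== SOURCE A (Python) =====
-- import collections
--
-- def shareCandies(candies, k):
--     """
--     :type candies: List[int]
--     :type k: int
--     :rtype: int
--     """
--
--     my_candies = collections.defaultdict(int)
--     max_count = 0
--
--     for candy in candies:
--         my_candies[candy] += 1
--
--     if k == 0:
--         return len(my_candies.keys())
--
--     for i in range(len(candies)):
--         sister_candy = candies[i]
--
--         my_candy_count = my_candies[sister_candy]
--         if my_candy_count == 1: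
--             my_candies.pop(sister_candy)
--         else:
--             my_candies[sister_candy] -= 1
--
--         if i >= k - 1:
--             max_count = max(len(my_candies.keys()), max_count)
--             to_add_candy = candies[i-k+1]
--             my_candies[to_add_candy] += 1
--
--     return max_count
-- ===== SOURCE B (Python) =====
-- import collections
--
-- def shareCandies(candies, k):
--     """Sliding fixed-size window with a global Counter and an incrementally
--     maintained count of distinct flavors outside the window."""
--     total = collections.Counter(candies)
--     if k == 0:
--         return len(total)
--     n = len(candies)
--     if k > n:
--         return 0
--     win = collections.Counter()
--     outside = len(total)
--     for j in range(k):
--         c = candies[j]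
--         win[c] += 1
--         if win[c] == total[c]:
--             outside -= 1
--     best = outside
--     for i in range(k, n):
--         left = candies[i - k]
--         if win[left] == total[left]:
--             outside += 1
--         win[left] -= 1
--         c = candies[i]
--         win[c] += 1
--         if win[c] == total[c]:
--             outside -= 1
--         if outside > best:
--             best = outside
--     return best
-- ===== Notes on version B (the rewrite author's own statement) =====
-- stated objective: alternative
-- what changed: Instead of A's destructive pass that starts from a full Counter and pops/decrements while re-adding trailing elements, B keeps the global Counter fixed and slides a window Counter of size k, maintaining an integer 'distinct outside' that flips exactly when a flavor's in-window count reaches/leaves its global count.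
-- outside the precondition, e.g. on shareCandies([], -1): A returns 0, B raises IndexError
import Mathlib
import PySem

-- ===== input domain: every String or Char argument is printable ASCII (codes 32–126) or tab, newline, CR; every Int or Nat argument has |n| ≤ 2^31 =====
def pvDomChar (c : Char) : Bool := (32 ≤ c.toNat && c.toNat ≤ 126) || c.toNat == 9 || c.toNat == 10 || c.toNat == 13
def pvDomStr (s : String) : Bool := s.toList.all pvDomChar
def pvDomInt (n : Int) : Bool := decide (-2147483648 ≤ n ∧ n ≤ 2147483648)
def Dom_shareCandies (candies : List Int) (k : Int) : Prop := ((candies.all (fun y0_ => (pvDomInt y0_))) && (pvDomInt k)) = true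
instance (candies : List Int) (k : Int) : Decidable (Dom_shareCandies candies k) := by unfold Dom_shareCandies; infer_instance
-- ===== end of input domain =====

-- B replaces A's destructive counter (pop/decrement while re-adding trailing elements) by a fixed
-- global Counter plus a sliding window Counter with an incrementally maintained distinct-outside count.


-- ===== PORT A =====
def shareCandies (candies : List Int) (k : Int) : Int :=
  let my := candies.foldl (fun d c => d.modify c 0 (· + 1)) PySem.Dict.empty
  if k == 0 then (my.keys.length : Int)
  else
    ((PySem.List.pyRange 0 (candies.length : Int)).foldl
      (fun (st : PySem.Dict Int Int × Int) i =>
        let sister := PySem.List.pyGetD candies i 0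
        let cnt := st.1.getD sister 0
        let my1 := if cnt == 1 then st.1.erase sister else st.1.modify sister 0 (· - 1)
        if k - 1 ≤ i then
          (my1.modify (PySem.List.pyGetD candies (i - k + 1) 0) 0 (· + 1),
           max (my1.keys.length : Int) st.2)
        else (my1, st.2))
      (my, 0)).2

-- ===== PORT B =====
def shareCandies_alt (candies : List Int) (k : Int) : Int :=
  let total := PySem.Dict.counter candies
  if k == 0 then (total.keys.length : Int)
  else if k > (candies.length : Int) then 0
  else
    let st1 := (PySem.List.pyRange 0 k).foldl
      (fun (st : PySem.Dict Int Int × Int) j =>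
        let c := PySem.List.pyGetD candies j 0
        let win := st.1.modify c 0 (· + 1)
        (win, if win.getD c 0 == total.getD c 0 then st.2 - 1 else st.2))
      (PySem.Dict.empty, (total.keys.length : Int))
    let st2 := (PySem.List.pyRange k (candies.length : Int)).foldl
      (fun (st : PySem.Dict Int Int × Int × Int) i =>
        let left := PySem.List.pyGetD candies (i - k) 0
        let o1 := if st.1.getD left 0 == total.getD left 0 then st.2.1 + 1 else st.2.1
        let w1 := st.1.modify left 0 (· - 1)
        let c := PySem.List.pyGetD candies i 0
        let w2 := w1.modify c 0 (· + 1)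
        let o2 := if w2.getD c 0 == total.getD c 0 then o1 - 1 else o1
        (w2, o2, if o2 > st.2.2 then o2 else st.2.2))
      (st1.1, st1.2, st1.2)
    st2.2.2

-- ===== PRECONDITION & SPEC =====
-- Pre_ excludes negative k (outside the task's natural domain): there A raises IndexError on every
-- non-empty list, and its 0 on the empty list is only the loop body never running (B raises there).
def Pre_shareCandies (candies : List Int) (k : Int) : Prop := 0 ≤ k
instance (candies : List Int) (k : Int) : Decidable (Pre_shareCandies candies k) := by unfold Pre_shareCandies; infer_instance
def pvWitness_shareCandies : List Int × Int := ([1, 2, 2, 3], 2)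

def Spec_shareCandies (candies : List Int) (k : Int) (out : Int) : Prop := out = shareCandies_alt candies k
instance (candies : List Int) (k : Int) (out : Int) : Decidable (Spec_shareCandies candies k out) := by unfold Spec_shareCandies; infer_instance

-- ===== CLAIM (what is proved, stated in full; the proofs are below) =====
def Claim_equal_shareCandies : Prop := ∀ (candies : List Int) (k : Int), Dom_shareCandies candies k → Pre_shareCandies candies k → Spec_shareCandies candies k (shareCandies candies k)

-- ===== LEMMAS AND PROOFS =====
lemma pv_find_filter (l : List (Int × Int)) (c x : Int) :
    List.find? (fun p => p.1 == x) (l.filter (fun p => !(p.1 == c)))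
      = if x = c then none else List.find? (fun p => p.1 == x) l := by
  induction l with
  | nil => simp
  | cons a l ih =>
    by_cases hac : a.1 = c
    · have hb : (!((a.1 : Int) == c)) = false := by simp [hac]
      rw [List.filter_cons, hb]
      simp only [Bool.false_eq_true, if_false]
      rw [ih]
      by_cases h : x = c
      · simp [h]
      · have hax : ((a.1 : Int) == x) = false := by
          simp only [beq_eq_false_iff_ne, ne_eq, hac]
          omega
        simp [h, List.find?_cons, hax]
    · by_cases hax : a.1 = x
      · have hxc : ¬ x = c := by rw [← hax]; exact hac
        simp [List.filter_cons, show (!((a.1:Int) == c)) = true by simp [hac], hxc, List.find?_cons, hax]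
      · simp [List.filter_cons, hac, hax, List.find?_cons, ih]

lemma pv_getD_erase (d : PySem.Dict Int Int) (c x : Int) :
    (d.erase c).getD x 0 = if x = c then 0 else d.getD x 0 := by
  simp only [PySem.Dict.getD, PySem.Dict.get?, PySem.Dict.erase, pv_find_filter]
  split_ifs <;> simp

lemma pv_mem_keys_erase (d : PySem.Dict Int Int) (c x : Int) :
    x ∈ (d.erase c).keys ↔ x ∈ d.keys ∧ x ≠ c := by
  simp only [PySem.Dict.keys, PySem.Dict.erase, List.mem_map, List.mem_filter]
  constructor
  · rintro ⟨p, ⟨hp, hne⟩, rfl⟩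
    exact ⟨⟨p, hp, rfl⟩, by simpa using hne⟩
  · rintro ⟨⟨p, hp, rfl⟩, hne⟩
    exact ⟨p, ⟨hp, by simpa using hne⟩, rfl⟩

lemma pv_nodup_keys_erase (d : PySem.Dict Int Int) (c : Int) (h : d.keys.Nodup) :
    (d.erase c).keys.Nodup := by
  simp only [PySem.Dict.keys, PySem.Dict.erase] at *
  exact (List.Sublist.map _ (List.filter_sublist)).nodup h

lemma pv_nodup_keys_modify (d : PySem.Dict Int Int) (c : Int) (f : Int → Int) (h : d.keys.Nodup) :
    (d.modify c 0 f).keys.Nodup := by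
  rw [PySem.Dict.keys_modify]
  by_cases hc : d.contains c
  · rw [PySem.Dict.keys_insert_of_contains _ _ hc]; exact h
  · rw [PySem.Dict.keys_insert_of_not_contains _ _ (by simpa using hc)]
    simp only [List.nodup_append]
    refine ⟨h, by simp, ?_⟩
    simp only [PySem.Dict.contains_iff_mem_keys] at hc
    intro a ha b hb
    simp only [List.mem_singleton] at hb
    subst hb
    exact fun h2 => hc (h2 ▸ ha)

lemma pv_mem_keys_modify (d : PySem.Dict Int Int) (c x : Int) (f : Int → Int) :
    x ∈ (d.modify c 0 f).keys ↔ x = c ∨ x ∈ d.keys := by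
  rw [PySem.Dict.keys_modify, PySem.Dict.mem_keys_insert]


def pvOut (cs : List Int) (s i : Nat) : List Int := cs.take s ++ cs.drop i
def pvWin (cs : List Int) (s e : Nat) : List Int := (cs.take e).drop s
def pvCntOut (cs w : List Int) : Int :=
  (((PySem.Set.ofList cs).countP (fun x => decide (w.count x < cs.count x)) : Nat) : Int)

lemma pv_out_win_count (cs : List Int) (s e : Nat) (hse : s ≤ e) (x : Int) :
    (pvOut cs s e).count x + (pvWin cs s e).count x = cs.count x := by
  have h1 : cs = cs.take e ++ cs.drop e := (List.take_append_drop e cs).symm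
  have h2 : cs.take e = (cs.take e).take s ++ (cs.take e).drop s := (List.take_append_drop s (cs.take e)).symm
  have h3 : (cs.take e).take s = cs.take s := by rw [List.take_take, Nat.min_eq_left hse]
  rw [pvOut, pvWin, List.count_append]
  conv_rhs => rw [h1, List.count_append]
  conv_rhs => rw [h2, List.count_append, h3]
  omega

lemma pv_distinct_eq_countP (cs out w : List Int) (h : ∀ x, out.count x + w.count x = cs.count x) :
    ((PySem.Set.ofList out).length : Int) = pvCntOut cs w := by
  have hperm : (PySem.Set.ofList out).Perm ((PySem.Set.ofList cs).filter (fun x => decide (w.count x < cs.count x))) := by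
    refine (List.perm_ext_iff_of_nodup (PySem.Set.nodup_ofList out) ((PySem.Set.nodup_ofList cs).filter _)).mpr ?_
    intro x
    rw [PySem.Set.mem_ofList, List.mem_filter, PySem.Set.mem_ofList]
    constructor
    · intro hx
      have hcx : 0 < out.count x := List.count_pos_iff.mpr hx
      have := h x
      exact ⟨List.count_pos_iff.mp (by omega), by simp only [decide_eq_true_eq]; omega⟩
    · rintro ⟨hx, hlt⟩
      simp only [decide_eq_true_eq] at hlt
      have := h x
      exact List.count_pos_iff.mp (by omega)
  rw [pvCntOut, List.countP_eq_length_filter, hperm.length_eq]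

lemma pv_countP_flip (S : List Int) (hS : S.Nodup) (c : Int) (hc : c ∈ S) (p q : Int → Bool)
    (h : ∀ x, x ≠ c → p x = q x) :
    (S.countP q : Int) = (S.countP p : Int) + (if q c then 1 else 0) - (if p c then 1 else 0) := by
  induction S with
  | nil => simp at hc
  | cons a S ih =>
    rw [List.nodup_cons] at hS
    by_cases hac : a = c
    · subst hac
      have hq : S.countP q = S.countP p := by
        apply List.countP_congr
        intro x hx
        rw [h x (fun hxc => hS.1 (hxc ▸ hx))]
      rw [List.countP_cons, List.countP_cons, hq]
      push_cast
      split_ifs <;> simp_all <;> omega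
    · have hc' : c ∈ S := by cases hc with | head => exact absurd rfl hac | tail _ h => exact h
      have := ih hS.2 hc'
      rw [List.countP_cons, List.countP_cons, h a hac]
      push_cast at this ⊢
      split_ifs at this ⊢ <;> omega

lemma pv_B_loop1 (cs : List Int) (m j : Nat) (hm : j + m ≤ cs.length)
    (w : PySem.Dict Int Int) (o : Int)
    (hw : ∀ x, w.getD x 0 = ((cs.take j).count x : Int))
    (ho : o = pvCntOut cs (cs.take j)) :
    (∀ x, ((List.range' j m).foldl
      (fun (st : PySem.Dict Int Int × Int) (j : Nat) =>
        let c := PySem.List.pyGetD cs (j : Int) 0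
        let win := st.1.modify c 0 (· + 1)
        (win, if win.getD c 0 == (PySem.Dict.counter cs).getD c 0 then st.2 - 1 else st.2))
      (w, o)).1.getD x 0 = ((cs.take (j + m)).count x : Int))
    ∧ ((List.range' j m).foldl
      (fun (st : PySem.Dict Int Int × Int) (j : Nat) =>
        let c := PySem.List.pyGetD cs (j : Int) 0
        let win := st.1.modify c 0 (· + 1)
        (win, if win.getD c 0 == (PySem.Dict.counter cs).getD c 0 then st.2 - 1 else st.2))
      (w, o)).2 = pvCntOut cs (cs.take (j + m)) := by
  induction m generalizing j w o with
  | zero => simpa using ⟨hw, ho⟩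
  | succ m ih =>
    rw [List.range'_succ, List.foldl_cons]
    have hj : j < cs.length := by omega
    have hc : PySem.List.pyGetD cs (j : Int) 0 = cs[j] := by
      rw [PySem.List.pyGetD_natCast, List.getD_eq_getElem cs 0 hj]
    simp only [hc]
    have htake : cs.take (j + 1) = cs.take j ++ [cs[j]] := List.take_succ_eq_append_getElem hj
    have hcnt1 : ∀ x, ((w.modify cs[j] 0 (· + 1)).getD x 0) = (((cs.take (j+1)).count x : Nat) : Int) := by
      intro x
      rw [PySem.Dict.getD_modify]
      by_cases hx : x = cs[j]
      · rw [if_pos hx, hw, htake, hx, List.count_append]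
        simp
      · rw [if_neg hx, hw, htake, List.count_append]
        have h0 : List.count x [cs[j]] = 0 := List.count_eq_zero.mpr (by simp [List.mem_singleton]; omega)
        rw [h0, Nat.add_zero]
    have hmemj : cs[j] ∈ cs := List.getElem_mem hj
    have hcountle : (cs.take (j+1)).count cs[j] ≤ cs.count cs[j] :=
      (List.take_sublist (j+1) cs).count_le cs[j]
    have hcj : (cs.take (j+1)).count cs[j] = (cs.take j).count cs[j] + 1 := by
      rw [htake, List.count_append]
      simp [List.count_singleton]
    have hflip : (if (w.modify cs[j] 0 (· + 1)).getD cs[j] 0 == (PySem.Dict.counter cs).getD cs[j] 0 then o - 1 else o)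
        = pvCntOut cs (cs.take (j+1)) := by
      rw [hcnt1, PySem.Dict.getD_counter, ho]
      have hstep := pv_countP_flip (PySem.Set.ofList cs) (PySem.Set.nodup_ofList cs) cs[j]
        ((PySem.Set.mem_ofList cs cs[j]).mpr hmemj)
        (fun x => decide ((cs.take j).count x < cs.count x))
        (fun x => decide ((cs.take (j+1)).count x < cs.count x))
        (fun x hx => by
          have hxx : (cs.take (j+1)).count x = (cs.take j).count x := by
            rw [htake, List.count_append]
            have h0 : List.count x [cs[j]] = 0 := List.count_eq_zero.mpr (by simp [List.mem_singleton]; omega)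
            rw [h0, Nat.add_zero]
          simp only [hxx])
      rw [hcj] at hcountle
      rw [pvCntOut, pvCntOut, hstep]
      simp only [hcj, decide_eq_true_eq, beq_iff_eq]
      split_ifs <;> push_cast at * <;> omega
    have hrec := ih (j+1) (by omega) (w.modify cs[j] 0 (· + 1)) _ hcnt1 hflip
    simpa [show j + 1 + m = j + (m+1) by omega] using hrec

def pvD (cs : List Int) (K j : Nat) : Int := ((PySem.Set.ofList (pvOut cs (j + 1 - K) (j + 1))).length : Int)

lemma pv_win_sublist (cs : List Int) (s e : Nat) : (pvWin cs s e).Sublist cs :=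
  ((List.drop_sublist s (cs.take e)).trans (List.take_sublist e cs))

lemma pv_cntOut_eq_pvD (cs : List Int) (K j : Nat) (hK : 1 ≤ K) (hKj : K ≤ j + 1)
    (hj : j + 1 ≤ cs.length) :
    pvCntOut cs (pvWin cs (j + 1 - K) (j + 1)) = pvD cs K j := by
  rw [pvD, pv_distinct_eq_countP cs _ (pvWin cs (j + 1 - K) (j + 1))
    (fun x => pv_out_win_count cs (j + 1 - K) (j + 1) (by omega) x), pvCntOut]

lemma pv_max_eq (a x : Int) : (if x > a then x else a) = max a x := by
  rw [max_def]; split_ifs <;> omega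

lemma pv_B_loop2 (cs : List Int) (k : Int) (hk : 1 ≤ k) (m j : Nat) (hm : j + m = cs.length)
    (hkj : k.toNat ≤ j)
    (w : PySem.Dict Int Int) (o b : Int)
    (hw : ∀ x, w.getD x 0 = ((pvWin cs (j - k.toNat) j).count x : Int))
    (ho : o = pvCntOut cs (pvWin cs (j - k.toNat) j)) :
    ((List.range' j m).foldl
      (fun (st : PySem.Dict Int Int × Int × Int) (i : Nat) =>
        let left := PySem.List.pyGetD cs ((i : Int) - k) 0
        let o1 := if st.1.getD left 0 == (PySem.Dict.counter cs).getD left 0 then st.2.1 + 1 else st.2.1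
        let w1 := st.1.modify left 0 (· - 1)
        let c := PySem.List.pyGetD cs (i : Int) 0
        let w2 := w1.modify c 0 (· + 1)
        let o2 := if w2.getD c 0 == (PySem.Dict.counter cs).getD c 0 then o1 - 1 else o1
        (w2, o2, if o2 > st.2.2 then o2 else st.2.2))
      (w, o, b)).2.2
    = ((List.range' j m).map (fun t => pvD cs k.toNat t)).foldl max b := by
  induction m generalizing j w o b with
  | zero => simp
  | succ m ih =>
    rw [List.range'_succ, List.foldl_cons, List.map_cons, List.foldl_cons]
    have hK1 : 1 ≤ k.toNat := by omega
    have hKj : k.toNat ≤ j := hkj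
    have hjn : j < cs.length := by omega
    have hKcast : ((k.toNat : Nat) : Int) = k := Int.toNat_of_nonneg (by omega)
    set K := k.toNat with hKdef
    have hjKn : j - K < cs.length := by omega
    have hleft : PySem.List.pyGetD cs ((j : Int) - k) 0 = cs[j - K] := by
      have : ((j : Int) - k) = ((j - K : Nat) : Int) := by omega
      rw [this, PySem.List.pyGetD_natCast, List.getD_eq_getElem cs 0 hjKn]
    have hcj : PySem.List.pyGetD cs ((j : Int)) 0 = cs[j] := by
      rw [PySem.List.pyGetD_natCast, List.getD_eq_getElem cs 0 hjn]
    simp only [hleft, hcj]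
    have hlentj : (cs.take j).length = j := by rw [List.length_take]; omega
    have hu_cons : pvWin cs (j - K) j = cs[j - K] :: pvWin cs (j - K + 1) j := by
      rw [pvWin, pvWin, List.drop_eq_getElem_cons (by omega : j - K < (cs.take j).length)]
      congr 1
      exact List.getElem_take
    have husub : (pvWin cs (j - K) j).Sublist cs := pv_win_sublist cs (j - K) j
    have hu'sub : (pvWin cs (j - K + 1) j).Sublist cs := pv_win_sublist cs (j - K + 1) j
    have hu''sub : (pvWin cs (j - K + 1) (j + 1)).Sublist cs := pv_win_sublist cs (j - K + 1) (j + 1)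
    have hcount_u : ∀ x, (pvWin cs (j - K) j).count x
        = (if cs[j - K] = x then 1 else 0) + (pvWin cs (j - K + 1) j).count x := by
      intro x
      rw [hu_cons, List.count_cons]
      by_cases hx : x = cs[j - K]
      · subst hx; simp; omega
      · have h1 : (cs[j - K] == x) = false := by simp; omega
        rw [h1]
        simp only [Bool.false_eq_true, if_false]
        rw [if_neg (show ¬cs[j - K] = x from fun h => hx h.symm)]
        omega
    have htake : cs.take (j + 1) = cs.take j ++ [cs[j]] := List.take_succ_eq_append_getElem hjn
    have hu''_eq : pvWin cs (j - K + 1) (j + 1) = pvWin cs (j - K + 1) j ++ [cs[j]] := by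
      rw [pvWin, pvWin, htake, List.drop_append_of_le_length (by omega)]
    -- counts after the two modifies
    have hw1 : ∀ x, ((w.modify cs[j - K] 0 (· - 1)).getD x 0)
        = (((pvWin cs (j - K + 1) j).count x : Nat) : Int) := by
      intro x
      rw [PySem.Dict.getD_modify]
      have hge1 : 1 ≤ (pvWin cs (j - K) j).count cs[j - K] := by
        rw [hu_cons]; simp [List.count_cons_self]
      by_cases hx : x = cs[j - K]
      · rw [if_pos hx, hw, hx]
        have h2 := hcount_u cs[j - K]
        rw [if_pos rfl] at h2
        push_cast
        omega
      · rw [if_neg hx, hw]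
        have := hcount_u x
        rw [if_neg (by omega)] at this
        omega
    have hw2 : ∀ x, (((w.modify cs[j - K] 0 (· - 1)).modify cs[j] 0 (· + 1)).getD x 0)
        = (((pvWin cs (j - K + 1) (j + 1)).count x : Nat) : Int) := by
      intro x
      rw [PySem.Dict.getD_modify]
      by_cases hx : x = cs[j]
      · rw [if_pos hx, hw1, hx, hu''_eq, List.count_append]
        simp
      · rw [if_neg hx, hw1, hu''_eq, List.count_append]
        have h0 : List.count x [cs[j]] = 0 := List.count_eq_zero.mpr (by simp [List.mem_singleton]; omega)
        rw [h0]
        push_cast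
        omega
    -- first flip: removing the left end
    have hmemleft : cs[j - K] ∈ cs := List.getElem_mem hjKn
    have hcntle : (pvWin cs (j - K) j).count cs[j - K] ≤ cs.count cs[j - K] := husub.count_le _
    have hge1 : 1 ≤ (pvWin cs (j - K) j).count cs[j - K] := by
      rw [hu_cons]; simp [List.count_cons_self]
    have ho1 : (if w.getD cs[j - K] 0 == (PySem.Dict.counter cs).getD cs[j - K] 0 then o + 1 else o)
        = pvCntOut cs (pvWin cs (j - K + 1) j) := by
      rw [hw, PySem.Dict.getD_counter, ho]
      have hstep := pv_countP_flip (PySem.Set.ofList cs) (PySem.Set.nodup_ofList cs) cs[j - K]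
        ((PySem.Set.mem_ofList cs cs[j - K]).mpr hmemleft)
        (fun x => decide ((pvWin cs (j - K) j).count x < cs.count x))
        (fun x => decide ((pvWin cs (j - K + 1) j).count x < cs.count x))
        (fun x hx => by
          have := hcount_u x
          rw [if_neg (by omega)] at this
          simp only [this, Nat.zero_add])
      have hcl := hcount_u cs[j - K]
      rw [if_pos rfl] at hcl
      rw [pvCntOut, pvCntOut, hstep]
      simp only [decide_eq_true_eq, beq_iff_eq]
      split_ifs <;> push_cast at * <;> omega
    -- second flip: adding the right end
    have hmemc : cs[j] ∈ cs := List.getElem_mem hjn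
    have hcntle2 : (pvWin cs (j - K + 1) (j + 1)).count cs[j] ≤ cs.count cs[j] := hu''sub.count_le _
    have hc'' : (pvWin cs (j - K + 1) (j + 1)).count cs[j] = (pvWin cs (j - K + 1) j).count cs[j] + 1 := by
      rw [hu''_eq, List.count_append]; simp
    have ho2 : (if ((w.modify cs[j - K] 0 (· - 1)).modify cs[j] 0 (· + 1)).getD cs[j] 0 == (PySem.Dict.counter cs).getD cs[j] 0
          then (if w.getD cs[j - K] 0 == (PySem.Dict.counter cs).getD cs[j - K] 0 then o + 1 else o) - 1
          else (if w.getD cs[j - K] 0 == (PySem.Dict.counter cs).getD cs[j - K] 0 then o + 1 else o))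
        = pvCntOut cs (pvWin cs (j - K + 1) (j + 1)) := by
      rw [hw2, PySem.Dict.getD_counter, ho1]
      have hstep := pv_countP_flip (PySem.Set.ofList cs) (PySem.Set.nodup_ofList cs) cs[j]
        ((PySem.Set.mem_ofList cs cs[j]).mpr hmemc)
        (fun x => decide ((pvWin cs (j - K + 1) j).count x < cs.count x))
        (fun x => decide ((pvWin cs (j - K + 1) (j + 1)).count x < cs.count x))
        (fun x hx => by
          have hxx : (pvWin cs (j - K + 1) (j + 1)).count x = (pvWin cs (j - K + 1) j).count x := by
            rw [hu''_eq, List.count_append]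
            have h0 : List.count x [cs[j]] = 0 := List.count_eq_zero.mpr (by simp [List.mem_singleton]; omega)
            rw [h0, Nat.add_zero]
          simp only [hxx])
      rw [hc''] at hcntle2
      rw [pvCntOut, pvCntOut, hstep]
      simp only [hc'', decide_eq_true_eq, beq_iff_eq]
      split_ifs <;> push_cast at * <;> omega
    -- recorded value is pvD at j
    have hrecord : pvCntOut cs (pvWin cs (j - K + 1) (j + 1)) = pvD cs K j := by
      have : j - K + 1 = j + 1 - K := by omega
      rw [this]
      exact pv_cntOut_eq_pvD cs K j hK1 (by omega) (by omega)
    have hshift : j + 1 - K = j - K + 1 := by omega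
    have hcongr := congrArg (fun t => pvCntOut cs (pvWin cs t (j + 1))) hshift
    have hcongr2 : ∀ x, (pvWin cs (j + 1 - K) (j + 1)).count x = (pvWin cs (j - K + 1) (j + 1)).count x := by
      intro x; rw [hshift]
    have hrec := ih (j + 1) (by omega) (by omega)
      ((w.modify cs[j - K] 0 (· - 1)).modify cs[j] 0 (· + 1)) _
      (if (if ((w.modify cs[j - K] 0 (· - 1)).modify cs[j] 0 (· + 1)).getD cs[j] 0 == (PySem.Dict.counter cs).getD cs[j] 0
          then (if w.getD cs[j - K] 0 == (PySem.Dict.counter cs).getD cs[j - K] 0 then o + 1 else o) - 1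
          else (if w.getD cs[j - K] 0 == (PySem.Dict.counter cs).getD cs[j - K] 0 then o + 1 else o)) > b
        then (if ((w.modify cs[j - K] 0 (· - 1)).modify cs[j] 0 (· + 1)).getD cs[j] 0 == (PySem.Dict.counter cs).getD cs[j] 0
          then (if w.getD cs[j - K] 0 == (PySem.Dict.counter cs).getD cs[j - K] 0 then o + 1 else o) - 1
          else (if w.getD cs[j - K] 0 == (PySem.Dict.counter cs).getD cs[j - K] 0 then o + 1 else o))
        else b)
      (fun x => by rw [hw2 x, hcongr2 x])
      (ho2.trans hcongr.symm)
    rw [hrec, ho2, hrecord, pv_max_eq]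

lemma pv_keys_length_eq (d : PySem.Dict Int Int) (l : List Int) (hnd : d.keys.Nodup)
    (hmem : ∀ x, x ∈ d.keys ↔ x ∈ l) :
    d.keys.length = (PySem.Set.ofList l).length := by
  refine List.Perm.length_eq ?_
  refine (List.perm_ext_iff_of_nodup hnd (PySem.Set.nodup_ofList l)).mpr ?_
  intro x; rw [PySem.Set.mem_ofList, hmem]

lemma pv_A_loop (cs : List Int) (k : Int) (hk : 1 ≤ k) (m i : Nat) (hm : i + m = cs.length)
    (d : PySem.Dict Int Int) (acc : Int)
    (hnd : d.keys.Nodup)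
    (hcnt : ∀ x, d.getD x 0 = (((pvOut cs (i + 1 - k.toNat) i).count x : Nat) : Int))
    (hmem : ∀ x, x ∈ d.keys ↔ x ∈ pvOut cs (i + 1 - k.toNat) i) :
    ((List.range' i m).foldl
      (fun (st : PySem.Dict Int Int × Int) (jn : Nat) =>
        let sister := PySem.List.pyGetD cs (jn : Int) 0
        let cnt := st.1.getD sister 0
        let my1 := if cnt == 1 then st.1.erase sister else st.1.modify sister 0 (· - 1)
        if k - 1 ≤ (jn : Int) then
          (my1.modify (PySem.List.pyGetD cs ((jn : Int) - k + 1) 0) 0 (· + 1),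
           max (my1.keys.length : Int) st.2)
        else (my1, st.2))
      (d, acc)).2
    = (((List.range' i m).filter (fun j : Nat => decide (k - 1 ≤ (j : Int)))).map (fun t => pvD cs k.toNat t)).foldl max acc := by
  induction m generalizing i d acc with
  | zero => simp
  | succ m ih =>
    rw [List.range'_succ, List.foldl_cons, List.filter_cons]
    have hK1 : 1 ≤ k.toNat := by omega
    set K := k.toNat with hKdef
    have hKcast : ((K : Nat) : Int) = k := Int.toNat_of_nonneg (by omega)
    have hin : i < cs.length := by omega
    have hsle : i + 1 - K ≤ i := by omega
    set s := i + 1 - K with hsdef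
    have hsn : s ≤ cs.length := by omega
    have hci : PySem.List.pyGetD cs ((i : Nat) : Int) 0 = cs[i] := by
      rw [PySem.List.pyGetD_natCast, List.getD_eq_getElem cs 0 hin]
    simp only [hci]
    have hdrop : cs.drop i = cs[i] :: cs.drop (i + 1) := List.drop_eq_getElem_cons hin
    have hpre_mid : ∀ x, (pvOut cs s i).count x
        = (pvOut cs s (i + 1)).count x + (if cs[i] = x then 1 else 0) := by
      intro x
      rw [pvOut, pvOut, List.count_append, List.count_append, hdrop, List.count_cons]
      by_cases hx : x = cs[i]
      · subst hx; simp; omega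
      · have h1 : (cs[i] == x) = false := by simp; omega
        rw [h1]
        simp only [Bool.false_eq_true, if_false]
        rw [if_neg (fun h => hx h.symm)]
        omega
    have hpre_pos : 1 ≤ (pvOut cs s i).count cs[i] := by
      have := hpre_mid cs[i]
      rw [if_pos rfl] at this
      omega
    -- the dict after pop/decrement
    have hmy1cnt : ∀ x, ((if d.getD cs[i] 0 == 1 then d.erase cs[i] else d.modify cs[i] 0 (· - 1)).getD x 0)
        = (((pvOut cs s (i + 1)).count x : Nat) : Int) := by
      intro x
      by_cases h1 : d.getD cs[i] 0 == 1
      · rw [if_pos h1, pv_getD_erase]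
        have hc1 : (pvOut cs s i).count cs[i] = 1 := by
          have := hcnt cs[i]; rw [this] at h1; simp at h1; exact_mod_cast h1
        by_cases hx : x = cs[i]
        · rw [if_pos hx, hx]
          have := hpre_mid cs[i]
          rw [if_pos rfl] at this
          omega
        · rw [if_neg hx, hcnt]
          have := hpre_mid x
          rw [if_neg (fun h => hx h.symm)] at this
          omega
      · rw [if_neg h1, PySem.Dict.getD_modify]
        by_cases hx : x = cs[i]
        · rw [if_pos hx, hx, hcnt]
          have := hpre_mid cs[i]
          rw [if_pos rfl] at this
          push_cast
          omega
        · rw [if_neg hx, hcnt]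
          have := hpre_mid x
          rw [if_neg (fun h => hx h.symm)] at this
          omega
    have hmy1mem : ∀ x, x ∈ (if d.getD cs[i] 0 == 1 then d.erase cs[i] else d.modify cs[i] 0 (· - 1)).keys
        ↔ x ∈ pvOut cs s (i + 1) := by
      intro x
      by_cases h1 : d.getD cs[i] 0 == 1
      · rw [if_pos h1, pv_mem_keys_erase]
        have hc1 : (pvOut cs s i).count cs[i] = 1 := by
          have := hcnt cs[i]; rw [this] at h1; simp at h1; exact_mod_cast h1
        have hmid0 : (pvOut cs s (i + 1)).count cs[i] = 0 := by
          have := hpre_mid cs[i]; rw [if_pos rfl] at this; omega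
        constructor
        · rintro ⟨hxk, hxne⟩
          rw [hmem] at hxk
          have hxp : 0 < (pvOut cs s i).count x := List.count_pos_iff.mpr hxk
          have := hpre_mid x
          rw [if_neg (fun h => hxne h.symm)] at this
          exact List.count_pos_iff.mp (by omega)
        · intro hxm
          have hxp : 0 < (pvOut cs s (i + 1)).count x := List.count_pos_iff.mpr hxm
          have hxne : x ≠ cs[i] := fun h => by rw [h] at hxp; omega
          have := hpre_mid x
          rw [if_neg (fun h => hxne h.symm)] at this
          exact ⟨(hmem x).mpr (List.count_pos_iff.mp (by omega)), hxne⟩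
      · rw [if_neg h1, pv_mem_keys_modify]
        have hcge : 2 ≤ (pvOut cs s i).count cs[i] := by
          have h2 := hcnt cs[i]
          simp only [beq_iff_eq] at h1
          rw [h2] at h1
          have : (pvOut cs s i).count cs[i] ≠ 1 := fun h => h1 (by exact_mod_cast h)
          omega
        have hmidpos : 0 < (pvOut cs s (i + 1)).count cs[i] := by
          have := hpre_mid cs[i]; rw [if_pos rfl] at this; omega
        constructor
        · rintro (hx | hxk)
          · rw [hx]; exact List.count_pos_iff.mp hmidpos
          · rw [hmem] at hxk
            by_cases hx : x = cs[i]
            · rw [hx]; exact List.count_pos_iff.mp hmidpos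
            · have hxp : 0 < (pvOut cs s i).count x := List.count_pos_iff.mpr hxk
              have := hpre_mid x
              rw [if_neg (fun h => hx h.symm)] at this
              exact List.count_pos_iff.mp (by omega)
        · intro hxm
          by_cases hx : x = cs[i]
          · exact Or.inl hx
          · have hxp : 0 < (pvOut cs s (i + 1)).count x := List.count_pos_iff.mpr hxm
            have := hpre_mid x
            rw [if_neg (fun h => hx h.symm)] at this
            exact Or.inr ((hmem x).mpr (List.count_pos_iff.mp (by omega)))
    have hmy1nd : (if d.getD cs[i] 0 == 1 then d.erase cs[i] else d.modify cs[i] 0 (· - 1)).keys.Nodup := by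
      by_cases h1 : d.getD cs[i] 0 == 1
      · rw [if_pos h1]; exact pv_nodup_keys_erase d cs[i] hnd
      · rw [if_neg h1]; exact pv_nodup_keys_modify d cs[i] _ hnd
    by_cases hcond : k - 1 ≤ (i : Int)
    · have hKi : K ≤ i + 1 := by omega
      have hsi : s = i + 1 - K := rfl
      have hsn' : s < cs.length := by omega
      have htoadd : PySem.List.pyGetD cs ((i : Int) - k + 1) 0 = cs[s] := by
        have : ((i : Int) - k + 1) = ((s : Nat) : Int) := by omega
        rw [this, PySem.List.pyGetD_natCast, List.getD_eq_getElem cs 0 hsn']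
      have htakes : cs.take (s + 1) = cs.take s ++ [cs[s]] := List.take_succ_eq_append_getElem hsn'
      have hout_succ : ∀ x, (pvOut cs (s + 1) (i + 1)).count x
          = (pvOut cs s (i + 1)).count x + (if cs[s] = x then 1 else 0) := by
        intro x
        rw [pvOut, pvOut, List.count_append, List.count_append, htakes, List.count_append, List.count_cons]
        by_cases hx : x = cs[s]
        · subst hx; simp; omega
        · have h1 : (cs[s] == x) = false := by simp; omega
          rw [h1]
          simp only [Bool.false_eq_true, if_false]
          rw [if_neg (fun h => hx h.symm)]
          simp
      have hreclen : (((if d.getD cs[i] 0 == 1 then d.erase cs[i] else d.modify cs[i] 0 (· - 1)).keys.length : Nat) : Int)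
          = pvD cs K i := by
        rw [pv_keys_length_eq _ (pvOut cs s (i + 1)) hmy1nd hmy1mem, pvD]
      -- new dict after re-adding cs[s]
      have hd2cnt : ∀ x, (((if d.getD cs[i] 0 == 1 then d.erase cs[i] else d.modify cs[i] 0 (· - 1)).modify cs[s] 0 (· + 1)).getD x 0)
          = (((pvOut cs ((i + 1) + 1 - K) (i + 1)).count x : Nat) : Int) := by
        intro x
        have hs1 : (i + 1) + 1 - K = s + 1 := by omega
        rw [hs1, PySem.Dict.getD_modify]
        by_cases hx : x = cs[s]
        · rw [if_pos hx, hx, hmy1cnt]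
          have := hout_succ cs[s]
          rw [if_pos rfl] at this
          push_cast
          omega
        · rw [if_neg hx, hmy1cnt]
          have := hout_succ x
          rw [if_neg (fun h => hx h.symm)] at this
          omega
      have hd2mem : ∀ x, x ∈ ((if d.getD cs[i] 0 == 1 then d.erase cs[i] else d.modify cs[i] 0 (· - 1)).modify cs[s] 0 (· + 1)).keys
          ↔ x ∈ pvOut cs ((i + 1) + 1 - K) (i + 1) := by
        intro x
        have hs1 : (i + 1) + 1 - K = s + 1 := by omega
        rw [hs1, pv_mem_keys_modify]
        have hspos : 0 < (pvOut cs (s + 1) (i + 1)).count cs[s] := by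
          have := hout_succ cs[s]; rw [if_pos rfl] at this; omega
        constructor
        · rintro (hx | hxk)
          · rw [hx]; exact List.count_pos_iff.mp hspos
          · by_cases hx : x = cs[s]
            · rw [hx]; exact List.count_pos_iff.mp hspos
            · have hxp : 0 < (pvOut cs s (i + 1)).count x :=
                List.count_pos_iff.mpr ((hmy1mem x).mp hxk)
              have := hout_succ x
              rw [if_neg (fun h => hx h.symm)] at this
              exact List.count_pos_iff.mp (by omega)
        · intro hxm
          by_cases hx : x = cs[s]
          · exact Or.inl hx
          · have hxp : 0 < (pvOut cs (s + 1) (i + 1)).count x := List.count_pos_iff.mpr hxm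
            have := hout_succ x
            rw [if_neg (fun h => hx h.symm)] at this
            exact Or.inr ((hmy1mem x).mpr (List.count_pos_iff.mp (by omega)))
      have hd2nd : ((if d.getD cs[i] 0 == 1 then d.erase cs[i] else d.modify cs[i] 0 (· - 1)).modify cs[s] 0 (· + 1)).keys.Nodup :=
        pv_nodup_keys_modify _ cs[s] _ hmy1nd
      have hrec := ih (i + 1) (by omega)
        ((if d.getD cs[i] 0 == 1 then d.erase cs[i] else d.modify cs[i] 0 (· - 1)).modify cs[s] 0 (· + 1))
        (max ((if d.getD cs[i] 0 == 1 then d.erase cs[i] else d.modify cs[i] 0 (· - 1)).keys.length : Int) acc)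
        hd2nd hd2cnt hd2mem
      have hdec : (decide (k - 1 ≤ (i : Int))) = true := by simpa using hcond
      simp only [if_pos hcond, htoadd]
      rw [hrec, hdec, if_pos rfl, List.map_cons, List.foldl_cons]
      congr 1
      rw [hreclen, max_comm]
    · have hKi : i + 1 < K := by omega
      have hs0 : s = 0 := by omega
      have hs1 : (i + 1) + 1 - K = 0 := by omega
      have hrec := ih (i + 1) (by omega)
        (if d.getD cs[i] 0 == 1 then d.erase cs[i] else d.modify cs[i] 0 (· - 1)) acc
        hmy1nd
        (by rw [hs1]; intro x; rw [hmy1cnt, hs0])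
        (by rw [hs1]; intro x; rw [hmy1mem, hs0])
      have hdec : (decide (k - 1 ≤ (i : Int))) = false := by simpa using hcond
      simp only [if_neg hcond]
      rw [hdec]
      simp only [Bool.false_eq_true, if_false]
      exact hrec

lemma pv_pyRange_natCast (a n : Nat) :
    PySem.List.pyRange (a : Int) ((a + n : Nat) : Int) = (List.range' a n).map (fun t : Nat => (t : Int)) := by
  induction n generalizing a with
  | zero => simp [PySem.List.pyRange]
  | succ n ih =>
    rw [PySem.List.pyRange_one_cons (by exact_mod_cast Nat.lt_add_of_pos_right n.succ_pos)]
    have h1 : ((a : Int) + 1) = ((a + 1 : Nat) : Int) := by push_cast; ring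
    have h2 : ((a + (n + 1) : Nat) : Int) = (((a + 1) + n : Nat) : Int) := by push_cast; ring
    rw [h1, h2, ih (a + 1)]
    simp [List.range'_succ]

lemma pv_pyRange_zero (n : Nat) :
    PySem.List.pyRange 0 (n : Int) = (List.range' 0 n).map (fun t : Nat => (t : Int)) := by
  simpa using pv_pyRange_natCast 0 n

lemma pv_cntOut_nil (cs : List Int) : pvCntOut cs [] = ((PySem.Set.ofList cs).length : Int) := by
  rw [pvCntOut, List.countP_eq_length_filter, List.filter_eq_self.mpr ?_]
  intro x hx
  simp only [decide_eq_true_eq, List.count_nil]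
  exact List.count_pos_iff.mpr ((PySem.Set.mem_ofList cs x).mp hx)

lemma pv_D_nonneg (cs : List Int) (K j : Nat) : 0 ≤ pvD cs K j := by
  rw [pvD]; positivity

-- ===== VERDICT (by name: the statement is the Claim_ definition above) =====
theorem shareCandies_spec : Claim_equal_shareCandies := by
  intro candies k _ hpre
  unfold Spec_shareCandies shareCandies shareCandies_alt Pre_shareCandies at *
  by_cases hk0 : k = 0
  · subst hk0
    simp only [beq_self_eq_true, if_true, ← PySem.Dict.counter_eq_foldl]
  · have hk1 : 1 ≤ k := by omega
    have hKcast : ((k.toNat : Nat) : Int) = k := Int.toNat_of_nonneg (by omega)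
    set K := k.toNat with hKdef
    set n := candies.length with hndef
    have hK1 : 1 ≤ K := by omega
    have hbeq : (k == 0) = false := by simp; omega
    rw [hbeq]
    simp only [Bool.false_eq_true, if_false]
    -- A's side reduced to a fold of pvD values over the recording indices
    have hAeq : ((PySem.List.pyRange 0 (n : Int)).foldl
      (fun (st : PySem.Dict Int Int × Int) i =>
        let sister := PySem.List.pyGetD candies i 0
        let cnt := st.1.getD sister 0
        let my1 := if cnt == 1 then st.1.erase sister else st.1.modify sister 0 (· - 1)
        if k - 1 ≤ i then
          (my1.modify (PySem.List.pyGetD candies (i - k + 1) 0) 0 (· + 1),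
           max (my1.keys.length : Int) st.2)
        else (my1, st.2))
      (candies.foldl (fun d c => d.modify c 0 (· + 1)) PySem.Dict.empty, 0)).2
        = (((List.range' 0 n).filter (fun j : Nat => decide (k - 1 ≤ (j : Int)))).map (fun t => pvD candies K t)).foldl max 0 := by
      rw [pv_pyRange_zero, List.foldl_map, ← PySem.Dict.counter_eq_foldl]
      exact pv_A_loop candies k hk1 n 0 (by omega) (PySem.Dict.counter candies) 0
        (PySem.Dict.nodup_keys_counter candies)
        (fun x => by
          rw [PySem.Dict.getD_counter]
          congr 1
          rw [pvOut]
          have h0 : 0 + 1 - K = 0 := by omega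
          rw [h0]
          simp)
        (fun x => by
          rw [PySem.Dict.keys_counter, PySem.Set.mem_ofList, pvOut]
          have h0 : 0 + 1 - K = 0 := by omega
          rw [h0]
          simp)
    rw [hAeq]
    by_cases hkn : k > (n : Int)
    · rw [if_pos hkn]
      have hfil : ((List.range' 0 n).filter (fun j : Nat => decide (k - 1 ≤ (j : Int)))) = [] := by
        rw [List.filter_eq_nil_iff]
        intro j hj
        rw [List.mem_range'_1] at hj
        simp only [decide_eq_true_eq]
        push_cast
        omega
      rw [hfil]
      simp
    · rw [if_neg hkn]
      have hKn : K ≤ n := by omega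
      -- split A's index list at the first full window
      have hsplit : List.range' 0 n = List.range' 0 (K - 1) ++ List.range' (K - 1) (n - K + 1) := by
        have := List.range'_append (s := 0) (m := K - 1) (n := n - K + 1) (step := 1)
        rw [show 0 + 1 * (K - 1) = K - 1 by omega, show (K - 1) + (n - K + 1) = n by omega] at this
        exact this.symm
      have hfil : ((List.range' 0 n).filter (fun j : Nat => decide (k - 1 ≤ (j : Int))))
          = List.range' (K - 1) (n - K + 1) := by
        rw [hsplit, List.filter_append]
        have h1 : (List.range' 0 (K - 1)).filter (fun j : Nat => decide (k - 1 ≤ (j : Int))) = [] := by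
          rw [List.filter_eq_nil_iff]
          intro j hj
          rw [List.mem_range'_1] at hj
          simp only [decide_eq_true_eq]
          push_cast
          omega
        have h2 : (List.range' (K - 1) (n - K + 1)).filter (fun j : Nat => decide (k - 1 ≤ (j : Int)))
            = List.range' (K - 1) (n - K + 1) := by
          rw [List.filter_eq_self]
          intro j hj
          rw [List.mem_range'_1] at hj
          simp only [decide_eq_true_eq]
          push_cast
          omega
        rw [h1, h2, List.nil_append]
      rw [hfil]
      -- B's first loop
      have hpr1 : PySem.List.pyRange 0 k = (List.range' 0 K).map (fun t : Nat => (t : Int)) := by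
        rw [← hKcast]
        exact_mod_cast pv_pyRange_zero K
      have hloop1 := pv_B_loop1 candies K 0 (by omega) PySem.Dict.empty
        ((PySem.Dict.counter candies).keys.length : Int)
        (fun x => by rw [PySem.Dict.getD_empty]; simp)
        (by
          rw [List.take_zero, pv_cntOut_nil, PySem.Dict.keys_counter])
      -- B's second loop
      have hpr2 : PySem.List.pyRange k (n : Int) = (List.range' K (n - K)).map (fun t : Nat => (t : Int)) := by
        have := pv_pyRange_natCast K (n - K)
        rw [show K + (n - K) = n by omega] at this
        rw [← hKcast]
        exact this
      have htake_win : candies.take K = pvWin candies (K - K) K := by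
        rw [pvWin, show K - K = 0 by omega, List.drop_zero]
      have hloop2 := pv_B_loop2 candies k hk1 (n - K) K (by omega) (le_refl K)
        (((List.range' 0 K).foldl
          (fun (st : PySem.Dict Int Int × Int) (j : Nat) =>
            let c := PySem.List.pyGetD candies (j : Int) 0
            let win := st.1.modify c 0 (· + 1)
            (win, if win.getD c 0 == (PySem.Dict.counter candies).getD c 0 then st.2 - 1 else st.2))
          (PySem.Dict.empty, ((PySem.Dict.counter candies).keys.length : Int))).1) (((List.range' 0 K).foldl
          (fun (st : PySem.Dict Int Int × Int) (j : Nat) =>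
            let c := PySem.List.pyGetD candies (j : Int) 0
            let win := st.1.modify c 0 (· + 1)
            (win, if win.getD c 0 == (PySem.Dict.counter candies).getD c 0 then st.2 - 1 else st.2))
          (PySem.Dict.empty, ((PySem.Dict.counter candies).keys.length : Int))).2) (((List.range' 0 K).foldl
          (fun (st : PySem.Dict Int Int × Int) (j : Nat) =>
            let c := PySem.List.pyGetD candies (j : Int) 0
            let win := st.1.modify c 0 (· + 1)
            (win, if win.getD c 0 == (PySem.Dict.counter candies).getD c 0 then st.2 - 1 else st.2))
          (PySem.Dict.empty, ((PySem.Dict.counter candies).keys.length : Int))).2)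
        (fun x => by rw [hloop1.1 x, Nat.zero_add, htake_win])
        (by rw [hloop1.2, Nat.zero_add, htake_win])
      have hrange : List.range' (K - 1) (n - K + 1) = (K - 1) :: List.range' K (n - K) := by
        rw [List.range'_succ, show K - 1 + 1 = K by omega]
      have hD0 : pvCntOut candies (candies.take K) = pvD candies K (K - 1) := by
        have := pv_cntOut_eq_pvD candies K (K - 1) hK1 (by omega) (by omega)
        rw [show K - 1 + 1 - K = 0 by omega, pvWin, List.drop_zero,
          show K - 1 + 1 = K by omega] at this
        rw [← this]
      have hfinal : List.foldl max 0 ((List.range' (K - 1) (n - K + 1)).map (fun t => pvD candies K t))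
          = List.foldl max (((List.range' 0 K).foldl
          (fun (st : PySem.Dict Int Int × Int) (j : Nat) =>
            let c := PySem.List.pyGetD candies (j : Int) 0
            let win := st.1.modify c 0 (· + 1)
            (win, if win.getD c 0 == (PySem.Dict.counter candies).getD c 0 then st.2 - 1 else st.2))
          (PySem.Dict.empty, ((PySem.Dict.counter candies).keys.length : Int))).2) ((List.range' K (n - K)).map (fun t => pvD candies K t)) := by
        rw [hrange, List.map_cons, List.foldl_cons, hloop1.2, Nat.zero_add, hD0,
          max_eq_right (pv_D_nonneg candies K (K - 1))]
      conv_rhs => rw [hpr1, List.foldl_map, hpr2, List.foldl_map]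
      exact hfinal.trans hloop2.symm
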